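-- pv_equiv track=rewrite | github.com/PanDAWMS/pilot-wrapper-plugins | pilotsource.py | _remapchecksums
-- ===== SOURCE A (Python) =====
-- def _remapchecksums(sources, checksums):
--     """
--     it converts the list of checksums (or a single None)
--     into a list of lists following the same layout
--     of sources
--     For example, if sources is [ ['a', 'b'], ['c'] ]
--     it converts "chk1, chk2, chk3" into [ ['chk1', 'chk2'], ['chk3'] ]
--     and None into [ [None, None], [None] ]
--     """
--
--     out = []
--
--     if checksums:
--         tmp = checksums.split(',')
--         # first we convert string "None" into object None
--         for i in range(len(tmp)):
--             tmp[i] = tmp[i].strip()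
--             if tmp[i].lower() == "none" or tmp[i].lower() == "null":
--                 tmp[i] = None
--     else:
--         # tmp is [None, None, None, ..., None]
--         # as many as needed to equal the total number of sources
--         tmp = [None] * sum( [len(i) for i in sources] )
--
--     for i in sources:
--         n = len(i)
--         out.append( tmp[:n] )
--         tmp = tmp[n:]
--
--     return out
-- ===== SOURCE B (Python) =====
-- def _remapchecksums(sources, checksums):
--     # Distribution pass: walk the flat values once, closing each bin as it
--     # reaches its target size, instead of slicing group by group.
--     if checksums:
--         vals = []
--         for p in checksums.split(','):
--             p = p.strip()
--             vals.append(None if p.lower() in ("none", "null") else p)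
--     else:
--         vals = [None] * sum(len(g) for g in sources)
--
--     sizes = [len(g) for g in sources]
--     result = []
--     cur = []
--     rest = sizes
--     for v in vals:
--         while rest and len(cur) >= rest[0]:
--             result.append(cur)
--             cur = []
--             rest = rest[1:]
--         if not rest:
--             break
--         cur.append(v)
--     while rest:
--         result.append(cur)
--         cur = []
--         rest = rest[1:]
--     return result
-- ===== Notes on version B (the rewrite author's own statement) =====
-- stated objective: alternative
-- what changed: Replaces the group-by-group slicing of the flat checksum list (repeated take/drop per source group) with a single distribution pass over the flat values that appends each value to the current bin and closes bins as they reach their target sizes.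
import Mathlib
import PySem

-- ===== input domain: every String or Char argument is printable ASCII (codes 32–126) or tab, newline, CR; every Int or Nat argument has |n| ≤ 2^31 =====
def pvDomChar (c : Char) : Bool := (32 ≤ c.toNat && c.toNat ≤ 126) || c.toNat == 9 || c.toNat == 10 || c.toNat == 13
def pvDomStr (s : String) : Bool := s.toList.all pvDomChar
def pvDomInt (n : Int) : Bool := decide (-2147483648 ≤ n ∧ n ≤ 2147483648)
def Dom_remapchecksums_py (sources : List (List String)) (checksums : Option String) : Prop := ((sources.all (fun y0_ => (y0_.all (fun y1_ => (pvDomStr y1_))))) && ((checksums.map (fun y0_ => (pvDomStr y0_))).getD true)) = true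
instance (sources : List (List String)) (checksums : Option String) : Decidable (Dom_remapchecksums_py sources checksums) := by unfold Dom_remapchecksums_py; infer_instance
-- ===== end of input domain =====

-- B changes the reshaping phase only: a single distribution pass over the flat values
-- (bins closed as they reach their target sizes) instead of per-group take/drop slicing.

-- ===== PORT A =====
-- 'tmp[i] = tmp[i].strip(); if lower in {"none","null"}: tmp[i] = None' over range(len(tmp)) = element-wise map
def pvParse (s : String) : List (Option String) :=
  ((PySem.Str.split? s ",").getD []).map (fun t =>
    let t' := PySem.Str.strip t
    if PySem.Str.lower t' == "none" || PySem.Str.lower t' == "null" then none else some t')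

def remapchecksums_py (sources : List (List String)) (checksums : Option String) : List (List (Option String)) :=
  -- Python truthiness of `checksums`: None and "" are falsy
  let s := checksums.getD ""
  let tmp : List (Option String) :=
    if s ≠ "" then pvParse s
    else List.replicate ((sources.map (fun g => g.length)).sum) none
  (sources.foldl
    (fun (st : List (List (Option String)) × List (Option String)) g =>
      (st.1 ++ [st.2.take g.length], st.2.drop g.length))
    ([], tmp)).1

-- ===== PORT B =====
-- the trailing 'while rest:' flush
def pvFlush (res : List (List (Option String))) (cur : List (Option String)) :
    List Nat → List (List (Option String))
  | [] => res
  | _ :: ns => pvFlush (res ++ [cur]) [] ns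

-- the inner 'while rest and len(cur) >= rest[0]:' bin-closing loop
def pvClose (res : List (List (Option String))) (cur : List (Option String)) :
    List Nat → List (List (Option String)) × List (Option String) × List Nat
  | [] => (res, cur, [])
  | n :: ns => if n ≤ cur.length then pvClose (res ++ [cur]) [] ns else (res, cur, n :: ns)

-- the 'for v in vals:' distribution loop (with its break)
def pvDistrib (res : List (List (Option String))) (cur : List (Option String))
    (rest : List Nat) : List (Option String) → List (List (Option String))
  | [] => pvFlush res cur rest
  | v :: vs =>
    match pvClose res cur rest with
    | (res', _, []) => res'        -- break; the final flush is a no-op on empty rest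
    | (res', cur', rest') => pvDistrib res' (cur' ++ [v]) rest' vs

def remapchecksums_py_alt (sources : List (List String)) (checksums : Option String) : List (List (Option String)) :=
  let s := checksums.getD ""
  let vals : List (Option String) :=
    if s ≠ "" then
      ((PySem.Str.split? s ",").getD []).map (fun p =>
        let p' := PySem.Str.strip p
        if PySem.Str.lower p' == "none" || PySem.Str.lower p' == "null" then none else some p')
    else List.replicate ((sources.map (fun g => g.length)).sum) none
  pvDistrib [] [] (sources.map (fun g => g.length)) vals

-- ===== PRECONDITION & SPEC =====
def Spec_remapchecksums_py (sources : List (List String)) (checksums : Option String) (out : List (List (Option String))) : Prop := out = remapchecksums_py_alt sources checksums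
instance (sources : List (List String)) (checksums : Option String) (out : List (List (Option String))) : Decidable (Spec_remapchecksums_py sources checksums out) := by unfold Spec_remapchecksums_py; infer_instance

-- ===== CLAIM (what is proved, stated in full; the proofs are below) =====
def Claim_equal_remapchecksums_py : Prop := ∀ (sources : List (List String)) (checksums : Option String), Dom_remapchecksums_py sources checksums → Spec_remapchecksums_py sources checksums (remapchecksums_py sources checksums)

-- ===== LEMMAS AND PROOFS =====
-- common characterisation: chunk the flat list by the size list
def pvChunk : List Nat → List (Option String) → List (List (Option String))
  | [], _ => []
  | n :: ns, tmp => tmp.take n :: pvChunk ns (tmp.drop n)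

theorem pvChunk_nil (ns : List Nat) : pvChunk ns [] = List.replicate ns.length [] := by
  induction ns with
  | nil => rfl
  | cons n ns ih => simp [pvChunk, ih, List.replicate_succ]

theorem foldlA_eq (sources : List (List String)) (acc : List (List (Option String)))
    (tmp : List (Option String)) :
    (sources.foldl
      (fun (st : List (List (Option String)) × List (Option String)) g =>
        (st.1 ++ [st.2.take g.length], st.2.drop g.length))
      (acc, tmp)).1 = acc ++ pvChunk (sources.map (fun g => g.length)) tmp := by
  induction sources generalizing acc tmp with
  | nil => simp [pvChunk]
  | cons g gs ih => simp [List.foldl, ih, pvChunk]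

theorem pvFlush_eq (res : List (List (Option String))) (cur : List (Option String))
    (ns : List Nat) (h : ns = [] ∨ cur.length ≤ ns.headI) :
    pvFlush res cur ns = res ++ pvChunk ns cur := by
  induction ns generalizing res cur with
  | nil => simp [pvFlush, pvChunk]
  | cons n ns ih =>
    rcases h with h | h
    · exact absurd h (by simp)
    · simp only [List.headI] at h
      simp [pvFlush, pvChunk, List.take_of_length_le h, List.drop_of_length_le h,
        ih _ [] (by cases ns <;> simp), pvChunk_nil]

-- skipping leading full/zero-size bins at the head of the size list (the while-loop),
-- parametrised by the induction hypothesis for the tail of the value list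
theorem pvSkip (v : Option String) (vs : List (Option String))
    (ih : ∀ (ns : List Nat) (cur : List (Option String)) (res : List (List (Option String))),
      ns = [] ∨ cur.length ≤ ns.headI → pvDistrib res cur ns vs = res ++ pvChunk ns (cur ++ vs)) :
    ∀ (ns : List Nat) (res : List (List (Option String))),
      pvDistrib res [] ns (v :: vs) = res ++ pvChunk ns (v :: vs) := by
  intro ns
  induction ns with
  | nil => intro res; simp [pvDistrib, pvClose, pvChunk]
  | cons m ms ihn =>
    intro res
    rcases Nat.eq_zero_or_pos m with hm | hm
    · subst hm
      have h1 : pvDistrib res [] (0 :: ms) (v :: vs) = pvDistrib (res ++ [[]]) [] ms (v :: vs) := by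
        simp [pvDistrib, pvClose]
      rw [h1, ihn (res ++ [[]])]
      simp [pvChunk]
    · have hm' : ¬ m = 0 := by omega
      have h1 : pvDistrib res [] (m :: ms) (v :: vs) = pvDistrib res [v] (m :: ms) vs := by
        simp [pvDistrib, pvClose, hm']
      rw [h1, ih (m :: ms) [v] res (Or.inr (by simpa using hm))]
      simp [pvChunk]

theorem pvDistrib_eq (vs : List (Option String)) (ns : List Nat)
    (cur : List (Option String)) (res : List (List (Option String)))
    (h : ns = [] ∨ cur.length ≤ ns.headI) :
    pvDistrib res cur ns vs = res ++ pvChunk ns (cur ++ vs) := by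
  induction vs generalizing ns cur res with
  | nil => simpa using pvFlush_eq res cur ns h
  | cons v vs ih =>
    rcases ns with _ | ⟨n, ns⟩
    · simp [pvDistrib, pvClose, pvChunk]
    · rcases h with h | h
      · exact absurd h (by simp)
      simp only [List.headI] at h
      rcases lt_or_eq_of_le h with hlt | heq
      · -- current bin not yet full: append v and continue
        have hnle : ¬ n ≤ cur.length := not_le.mpr hlt
        have h1 : pvDistrib res cur (n :: ns) (v :: vs) = pvDistrib res (cur ++ [v]) (n :: ns) vs := by
          simp [pvDistrib, pvClose, if_neg hnle]
        rw [h1, ih (n :: ns) (cur ++ [v]) res (Or.inr (by simpa using hlt))]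
        simp [pvChunk]
      · -- current bin full: close it, then skip any leading zero-size bins
        have hstep : pvDistrib res cur (n :: ns) (v :: vs)
            = pvDistrib (res ++ [cur]) [] ns (v :: vs) := by
          simp [pvDistrib, pvClose, ← heq]
        have hchunk : pvChunk (n :: ns) (cur ++ v :: vs)
            = cur :: pvChunk ns (v :: vs) := by
          simp [pvChunk, ← heq]
        rw [hstep, hchunk, pvSkip v vs ih ns (res ++ [cur])]
        simp

-- ===== VERDICT (by name: the statement is the Claim_ definition above) =====
theorem remapchecksums_py_spec : Claim_equal_remapchecksums_py := by
  intro sources checksums _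
  unfold Spec_remapchecksums_py remapchecksums_py remapchecksums_py_alt pvParse
  simp only []
  rw [foldlA_eq, pvDistrib_eq _ _ _ _ (by cases sources.map (fun g => g.length) <;> simp)]
  simp
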